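-- pv_equiv track=rewrite | github.com/abhitatachar2000/Python101 | Topic 4 - Dictionary/Problem01-FindFrequency.py | findFrequeny
-- ===== SOURCE A (Python) =====
-- def findFrequeny(aList):
--     freqDict = {}
--     for i in aList:
--         i = i.lower()
--         if i not in freqDict:
--             freqDict[i] = 1
--         else:
--             freqDict[i] = freqDict[i] + 1
--     return freqDict
-- ===== SOURCE B (Python) =====
-- def findFrequeny(aList):
--     lows = [i.lower() for i in aList]
--     return {k: lows.count(k) for k in dict.fromkeys(lows)}
-- ===== Notes on version B (the rewrite author's own statement) =====
-- stated objective: alternative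
-- what changed: Replaces the single accumulating-dict pass (test membership, insert or increment per item) with a two-phase scheme: lowercase everything once, dedup the lowered list in first-occurrence order, then build the dict by counting each distinct key with list.count.
import Mathlib
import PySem

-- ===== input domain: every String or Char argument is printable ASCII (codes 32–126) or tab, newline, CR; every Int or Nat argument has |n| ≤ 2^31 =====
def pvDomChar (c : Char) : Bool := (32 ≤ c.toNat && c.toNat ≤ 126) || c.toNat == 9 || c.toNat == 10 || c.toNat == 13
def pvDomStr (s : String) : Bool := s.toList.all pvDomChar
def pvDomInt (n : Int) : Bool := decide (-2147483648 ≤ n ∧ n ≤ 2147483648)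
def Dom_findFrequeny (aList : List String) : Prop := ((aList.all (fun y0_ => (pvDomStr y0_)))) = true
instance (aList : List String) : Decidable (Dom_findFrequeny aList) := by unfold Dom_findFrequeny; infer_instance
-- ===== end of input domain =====

-- B replaces A's running insert-or-increment dict pass with lowercase + ordered dedup + per-key count (alternative decomposition, same result).

-- ===== PORT A =====
-- one accumulating dict pass: lower each item, insert 1 if absent, else increment
def findFrequeny (aList : List String) : List (String × Int) :=
  (aList.foldl (fun d i =>
      let i := PySem.Str.lower i
      if d.contains i = false then d.insert i 1
      else d.insert i (d.getD i 0 + 1))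
    PySem.Dict.empty).items

-- ===== PORT B =====
-- lowercase once, dedup in first-occurrence order, count each distinct key
def findFrequeny_alt (aList : List String) : List (String × Int) :=
  let lows := aList.map PySem.Str.lower
  (PySem.List.dedup lows).map (fun k => (k, (lows.count k : Int)))

-- ===== PRECONDITION & SPEC =====
def Spec_findFrequeny (aList : List String) (out : List (String × Int)) : Prop := out = findFrequeny_alt aList
instance (aList : List String) (out : List (String × Int)) : Decidable (Spec_findFrequeny aList out) := by unfold Spec_findFrequeny; infer_instance

-- ===== CLAIM (what is proved, stated in full; the proofs are below) =====
def Claim_equal_findFrequeny : Prop := ∀ (aList : List String), Dom_findFrequeny aList → Spec_findFrequeny aList (findFrequeny aList)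

-- ===== LEMMAS AND PROOFS =====

-- A's branching step is exactly the counter step 'insert i (getD i 0 + 1)'
theorem findFrequeny_step_eq :
    (fun (d : PySem.Dict String Int) (i : String) =>
      let i := PySem.Str.lower i
      if d.contains i = false then d.insert i 1
      else d.insert i (d.getD i 0 + 1))
    = (fun d i => d.insert (PySem.Str.lower i) (d.getD (PySem.Str.lower i) 0 + 1)) := by
  funext d i
  by_cases h : d.contains (PySem.Str.lower i) = false
  · rw [PySem.Dict.getD_of_not_contains (h := h)]; simp [h]
  · simp [h]

-- pull the per-item lowering out of the fold into a map
theorem foldl_lower_map (l : List String) (d : PySem.Dict String Int) :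
    l.foldl (fun d i => d.insert (PySem.Str.lower i) (d.getD (PySem.Str.lower i) 0 + 1)) d
    = (l.map PySem.Str.lower).foldl (fun d i => d.insert i (d.getD i 0 + 1)) d := by
  induction l generalizing d with
  | nil => rfl
  | cons x xs ih => simp [List.foldl_cons, ih]

-- ===== VERDICT (by name: the statement is the Claim_ definition above) =====
theorem findFrequeny_spec : Claim_equal_findFrequeny := by
  intro aList _
  show findFrequeny aList = findFrequeny_alt aList
  unfold findFrequeny findFrequeny_alt
  rw [findFrequeny_step_eq]
  rw [foldl_lower_map aList PySem.Dict.empty]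
  rw [PySem.Dict.foldl_insert_getD_add_one_eq_counter, PySem.Dict.items_counter]
  simp [PySem.List.dedup_eq_ofList]
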